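-- pv_equiv track=rewrite | github.com/granthalf/Python | scripts/PVHEADSET/pvheadset.py | choose_best_audio
-- ===== SOURCE A (Python) =====
-- def choose_best_audio(audio_devices):
--     # Priority: Stereo Mix > Jabra > Realtek > anything else
--     for dev in audio_devices:
--         if "Stereo Mix" in dev or "Mixage stéréo" in dev:
--             return dev
--     for dev in audio_devices:
--         if "Jabra" in dev:
--             return dev
--     for dev in audio_devices:
--         if "Realtek" in dev:
--             return dev
--     return audio_devices[0] if audio_devices else None
-- ===== SOURCE B (Python) =====
-- def choose_best_audio(audio_devices):
--     # Single pass: rank each device (lower = better) and keep the first device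
--     # with the lowest rank seen so far.
--     best = None
--     for dev in audio_devices:
--         if "Stereo Mix" in dev or "Mixage stéréo" in dev:
--             r = 0
--         elif "Jabra" in dev:
--             r = 1
--         elif "Realtek" in dev:
--             r = 2
--         else:
--             r = 3
--         if best is None or r < best[0]:
--             best = (r, dev)
--     return best[1] if best is not None else None
-- ===== Notes on version B (the rewrite author's own statement) =====
-- stated objective: simpler
-- what changed: Replaced the three sequential priority scans plus first-element fallback by one pass that ranks each device and keeps the first device of lowest rank.
import Mathlib
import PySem

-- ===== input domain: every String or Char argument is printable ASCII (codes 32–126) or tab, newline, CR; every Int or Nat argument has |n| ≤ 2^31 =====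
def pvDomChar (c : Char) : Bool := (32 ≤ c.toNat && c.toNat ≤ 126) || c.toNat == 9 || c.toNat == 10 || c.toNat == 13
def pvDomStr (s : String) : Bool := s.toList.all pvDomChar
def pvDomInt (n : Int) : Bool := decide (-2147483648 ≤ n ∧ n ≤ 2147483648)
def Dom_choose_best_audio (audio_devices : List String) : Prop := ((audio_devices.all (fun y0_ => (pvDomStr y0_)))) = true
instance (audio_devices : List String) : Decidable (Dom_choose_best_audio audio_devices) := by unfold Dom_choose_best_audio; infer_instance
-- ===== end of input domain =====

-- B replaces A's three sequential priority scans plus fallback by a single pass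
-- tracking the first device of lowest rank (same return value; objective: simpler).


-- ===== PORT A =====
-- predicates for the three substring tests ("sub in dev")
def isStereo (dev : String) : Bool := PySem.Str.isIn "Stereo Mix" dev || PySem.Str.isIn "Mixage stéréo" dev
def isJabra (dev : String) : Bool := PySem.Str.isIn "Jabra" dev
def isRealtek (dev : String) : Bool := PySem.Str.isIn "Realtek" dev

-- three early-return scans, then `audio_devices[0] if audio_devices else None`
def choose_best_audio (audio_devices : List String) : Option String :=
  match audio_devices.find? isStereo with
  | some dev => some dev
  | none =>
    match audio_devices.find? isJabra with
    | some dev => some dev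
    | none =>
      match audio_devices.find? isRealtek with
      | some dev => some dev
      | none => audio_devices.head?

-- ===== PORT B =====
-- rank of a device: lower is better
def devRank (dev : String) : Nat :=
  if isStereo dev then 0 else if isJabra dev then 1 else if isRealtek dev then 2 else 3

-- one step of the single pass: keep `best` unless the new device ranks strictly lower
def pickStep (best : Option (Nat × String)) (dev : String) : Option (Nat × String) :=
  match best with
  | none => some (devRank dev, dev)
  | some (r, d) => if devRank dev < r then some (devRank dev, dev) else some (r, d)

def choose_best_audio_alt (audio_devices : List String) : Option String :=
  (audio_devices.foldl pickStep none).map Prod.snd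

-- ===== PRECONDITION & SPEC =====
def Spec_choose_best_audio (audio_devices : List String) (out : Option String) : Prop := out = choose_best_audio_alt audio_devices
instance (audio_devices : List String) (out : Option String) : Decidable (Spec_choose_best_audio audio_devices out) := by unfold Spec_choose_best_audio; infer_instance

-- ===== CLAIM (what is proved, stated in full; the proofs are below) =====
def Claim_equal_choose_best_audio : Prop := ∀ (audio_devices : List String), Dom_choose_best_audio audio_devices → Spec_choose_best_audio audio_devices (choose_best_audio audio_devices)

-- ===== LEMMAS AND PROOFS =====

-- proof-side reference function: first element of minimal rank, as a pair (rank, element)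
def Fp : List String → Option (Nat × String)
  | [] => none
  | x :: l =>
    match Fp l with
    | none => some (devRank x, x)
    | some (r, d) => if devRank x ≤ r then some (devRank x, x) else some (r, d)

theorem devRank_le_three (x : String) : devRank x ≤ 3 := by
  unfold devRank; split_ifs <;> omega

theorem devRank_eq_zero_iff (x : String) : devRank x = 0 ↔ isStereo x = true := by
  unfold devRank; split_ifs <;> simp_all

theorem devRank_eq_one_iff (x : String) :
    devRank x = 1 ↔ isStereo x = false ∧ isJabra x = true := by
  unfold devRank; split_ifs <;> simp_all

theorem devRank_eq_two_iff (x : String) :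
    devRank x = 2 ↔ isStereo x = false ∧ isJabra x = false ∧ isRealtek x = true := by
  unfold devRank; split_ifs <;> simp_all

theorem devRank_eq_three_iff (x : String) :
    devRank x = 3 ↔ isStereo x = false ∧ isJabra x = false ∧ isRealtek x = false := by
  unfold devRank; split_ifs <;> simp_all

theorem Fp_none_iff (l : List String) : Fp l = none ↔ l = [] := by
  cases l with
  | nil => simp [Fp]
  | cons x l =>
    simp only [Fp]
    cases h : Fp l
    · simp
    · simp; split_ifs <;> simp

theorem Fp_min (l : List String) (r : Nat) (d : String) (h : Fp l = some (r, d)) :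
    r = devRank d ∧ ∀ x ∈ l, r ≤ devRank x := by
  induction l generalizing r d with
  | nil => simp [Fp] at h
  | cons x l ih =>
    simp only [Fp] at h
    cases hl : Fp l with
    | none =>
      rw [hl] at h
      simp at h
      obtain ⟨h1, h2⟩ := h
      subst h1; subst h2
      refine ⟨rfl, ?_⟩
      intro y hy
      rcases List.mem_cons.mp hy with rfl | hy
      · exact le_refl _
      · exact absurd hy (by simp [(Fp_none_iff l).mp hl])
    | some p =>
      obtain ⟨r', d'⟩ := p
      rw [hl] at h
      dsimp only at h
      obtain ⟨hr', hmin⟩ := ih r' d' hl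
      split_ifs at h with hle
      · simp at h; obtain ⟨h1, h2⟩ := h; subst h1; subst h2
        refine ⟨rfl, ?_⟩
        intro y hy
        rcases List.mem_cons.mp hy with rfl | hy
        · exact le_refl _
        · exact le_trans hle (hmin y hy)
      · simp at h; obtain ⟨h1, h2⟩ := h; subst h1; subst h2
        refine ⟨hr', ?_⟩
        intro y hy
        rcases List.mem_cons.mp hy with rfl | hy
        · omega
        · exact hmin y hy

theorem Fp_first (l : List String) (r : Nat) (d : String) (h : Fp l = some (r, d)) :
    ∃ l1 l2, l = l1 ++ d :: l2 ∧ ∀ x ∈ l1, r < devRank x := by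
  induction l generalizing r d with
  | nil => simp [Fp] at h
  | cons x l ih =>
    simp only [Fp] at h
    cases hl : Fp l with
    | none =>
      rw [hl] at h; simp at h
      obtain ⟨h1, h2⟩ := h; subst h1; subst h2
      exact ⟨[], l, rfl, by simp⟩
    | some p =>
      obtain ⟨r', d'⟩ := p
      rw [hl] at h
      dsimp only at h
      split_ifs at h with hle
      · simp at h; obtain ⟨h1, h2⟩ := h; subst h1; subst h2
        exact ⟨[], l, rfl, by simp⟩
      · simp at h
        obtain ⟨rfl, rfl⟩ := h
        obtain ⟨l1, l2, hsplit, hgt⟩ := ih _ _ hl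
        refine ⟨x :: l1, l2, by simp [hsplit], ?_⟩
        intro y hy
        rcases List.mem_cons.mp hy with rfl | hy
        · omega
        · exact hgt y hy

-- B's fold with a live accumulator computes the same first-minimum as `Fp`
theorem fold_some (l : List String) (r : Nat) (d : String) :
    l.foldl pickStep (some (r, d)) =
      some (match Fp l with
            | none => (r, d)
            | some (r', d') => if r' < r then (r', d') else (r, d)) := by
  induction l generalizing r d with
  | nil => simp [Fp]
  | cons x l ih =>
    have hstep : List.foldl pickStep (some (r, d)) (x :: l) =
        if devRank x < r then List.foldl pickStep (some (devRank x, x)) l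
        else List.foldl pickStep (some (r, d)) l := by
      simp only [List.foldl_cons, pickStep]; split_ifs <;> rfl
    rw [hstep]
    cases hl : Fp l with
    | none =>
      have hF : Fp (x :: l) = some (devRank x, x) := by simp [Fp, hl]
      rw [hF]
      dsimp only
      by_cases h1 : devRank x < r
      · rw [if_pos h1, if_pos h1, ih, hl]
      · rw [if_neg h1, if_neg h1, ih, hl]
    | some p =>
      obtain ⟨r', d'⟩ := p
      by_cases hle : devRank x ≤ r'
      · have hF : Fp (x :: l) = some (devRank x, x) := by simp [Fp, hl, hle]
        rw [hF]
        dsimp only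
        by_cases h1 : devRank x < r
        · rw [if_pos h1, if_pos h1, ih, hl]
          dsimp only
          rw [if_neg (by omega : ¬ r' < devRank x)]
        · rw [if_neg h1, if_neg h1, ih, hl]
          dsimp only
          rw [if_neg (by omega : ¬ r' < r)]
      · have hF : Fp (x :: l) = some (r', d') := by simp [Fp, hl, hle]
        rw [hF]
        dsimp only
        by_cases h1 : devRank x < r
        · rw [if_pos h1, if_pos (by omega : r' < r), ih, hl]
          dsimp only
          rw [if_pos (by omega : r' < devRank x)]
        · rw [if_neg h1, ih, hl]

theorem alt_eq_Fp (l : List String) : choose_best_audio_alt l = (Fp l).map Prod.snd := by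
  cases l with
  | nil => rfl
  | cons x l =>
    have h0 : choose_best_audio_alt (x :: l) =
        (List.foldl pickStep (some (devRank x, x)) l).map Prod.snd := rfl
    rw [h0, fold_some]
    cases hl : Fp l with
    | none =>
      have hF : Fp (x :: l) = some (devRank x, x) := by simp [Fp, hl]
      rw [hF]
    | some p =>
      obtain ⟨r', d'⟩ := p
      dsimp only
      by_cases hle : devRank x ≤ r'
      · have hF : Fp (x :: l) = some (devRank x, x) := by simp [Fp, hl, hle]
        rw [hF, if_neg (by omega : ¬ r' < devRank x)]
      · have hF : Fp (x :: l) = some (r', d') := by simp [Fp, hl, hle]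
        rw [hF, if_pos (by omega : r' < devRank x)]

theorem a_eq_Fp (l : List String) : choose_best_audio l = (Fp l).map Prod.snd := by
  cases hF : Fp l with
  | none =>
    have : l = [] := (Fp_none_iff l).mp hF
    subst this; rfl
  | some p =>
    obtain ⟨r, d⟩ := p
    obtain ⟨hrd, hmin⟩ := Fp_min l r d hF
    obtain ⟨l1, l2, hsplit, hgt⟩ := Fp_first l r d hF
    subst hsplit
    simp only [Option.map_some]
    unfold choose_best_audio
    have hr3 : r ≤ 3 := by rw [hrd]; exact devRank_le_three d
    interval_cases r
    · -- r = 0 : first pass finds d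
      have hs : isStereo d = true := (devRank_eq_zero_iff d).mp hrd.symm
      have h1 : (l1.find? isStereo) = none := by
        rw [List.find?_eq_none]
        intro x hx
        have := hgt x hx
        simp only [Bool.not_eq_true]
        by_contra hc
        have : devRank x = 0 := (devRank_eq_zero_iff x).mpr (by simpa using hc)
        omega
      rw [List.find?_append, h1]
      simp [hs]
    · -- r = 1
      have hd := (devRank_eq_one_iff d).mp hrd.symm
      have hnostereo : ∀ x ∈ l1 ++ d :: l2, isStereo x = false := by
        intro x hx
        have := hmin x hx
        by_contra hc
        have : devRank x = 0 := (devRank_eq_zero_iff x).mpr (by simpa using hc)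
        omega
      have h1 : (l1 ++ d :: l2).find? isStereo = none := by
        rw [List.find?_eq_none]; intro x hx; simp [hnostereo x hx]
      have h2 : (l1.find? isJabra) = none := by
        rw [List.find?_eq_none]
        intro x hx
        have hgtx := hgt x hx
        simp only [Bool.not_eq_true]
        by_contra hc
        have hsx := hnostereo x (List.mem_append_left _ hx)
        have : devRank x = 1 := (devRank_eq_one_iff x).mpr ⟨hsx, by simpa using hc⟩
        omega
      rw [h1, List.find?_append, h2]
      simp [hd.2]
    · -- r = 2
      have hd := (devRank_eq_two_iff d).mp hrd.symm
      have hnostereo : ∀ x ∈ l1 ++ d :: l2, isStereo x = false := by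
        intro x hx
        have := hmin x hx
        by_contra hc
        have : devRank x = 0 := (devRank_eq_zero_iff x).mpr (by simpa using hc)
        omega
      have hnojabra : ∀ x ∈ l1 ++ d :: l2, isJabra x = false := by
        intro x hx
        have := hmin x hx
        by_contra hc
        have : devRank x = 1 :=
          (devRank_eq_one_iff x).mpr ⟨hnostereo x hx, by simpa using hc⟩
        omega
      have h1 : (l1 ++ d :: l2).find? isStereo = none := by
        rw [List.find?_eq_none]; intro x hx; simp [hnostereo x hx]
      have h2 : (l1 ++ d :: l2).find? isJabra = none := by
        rw [List.find?_eq_none]; intro x hx; simp [hnojabra x hx]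
      have h3 : (l1.find? isRealtek) = none := by
        rw [List.find?_eq_none]
        intro x hx
        have hgtx := hgt x hx
        simp only [Bool.not_eq_true]
        by_contra hc
        have : devRank x = 2 :=
          (devRank_eq_two_iff x).mpr
            ⟨hnostereo x (List.mem_append_left _ hx),
             hnojabra x (List.mem_append_left _ hx), by simpa using hc⟩
        omega
      rw [h1, h2, List.find?_append, h3]
      simp [hd.2.2]
    · -- r = 3 : all ranks are 3, so l1 = [] and the fallback returns the head
      have hl1 : l1 = [] := by
        cases l1 with
        | nil => rfl
        | cons y l1' =>
          have := hgt y (List.mem_cons_self)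
          have := devRank_le_three y
          omega
      subst hl1
      have hall3 : ∀ x ∈ d :: l2, devRank x = 3 := by
        intro x hx
        have := hmin x (by simpa using hx)
        have := devRank_le_three x
        omega
      have h1 : (d :: l2).find? isStereo = none := by
        rw [List.find?_eq_none]
        intro x hx
        have := (devRank_eq_three_iff x).mp (hall3 x hx)
        simp [this.1]
      have h2 : (d :: l2).find? isJabra = none := by
        rw [List.find?_eq_none]
        intro x hx
        have := (devRank_eq_three_iff x).mp (hall3 x hx)
        simp [this.2.1]
      have h3 : (d :: l2).find? isRealtek = none := by
        rw [List.find?_eq_none]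
        intro x hx
        have := (devRank_eq_three_iff x).mp (hall3 x hx)
        simp [this.2.2]
      simp only [List.nil_append]
      rw [h1, h2, h3]
      rfl

-- ===== VERDICT (by name: the statement is the Claim_ definition above) =====
theorem choose_best_audio_spec : Claim_equal_choose_best_audio := by
  intro l _
  unfold Spec_choose_best_audio
  rw [a_eq_Fp, alt_eq_Fp]
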